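-- pv_equiv track=rewrite | github.com/gillisandrew/linked-past | packages/linked-past/linked_past/core/context.py | get_relevant_examples
-- ===== SOURCE A (Python) =====
-- def get_relevant_examples(examples: list[dict], class_names: set[str], limit: int = 3) -> list[dict]:
--     """Return examples whose classes overlap with class_names, sorted by overlap size."""
--     scored = []
--     for ex in examples:
--         ex_classes = set(ex.get("classes", []))
--         if not ex_classes:
--             continue
--         overlap = len(ex_classes & class_names)
--         if overlap > 0:
--             scored.append((overlap, ex))
--     scored.sort(key=lambda x: x[0], reverse=True)
--     return [ex for _, ex in scored[:limit]]
-- ===== SOURCE B (Python) =====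
-- def get_relevant_examples(examples: list[dict], class_names: set[str], limit: int = 3) -> list[dict]:
--     """Counting-sort variant: score every example once, then collect matches
--     bucket-by-bucket from the highest overlap score down to 1 (input order
--     within a score), finally cut to `limit`."""
--     scored = [(len(set(ex.get("classes", [])) & class_names), ex) for ex in examples]
--     top = 0
--     for s, _ in scored:
--         if top < s:
--             top = s
--     out = []
--     for k in range(top, 0, -1):
--         for s, ex in scored:
--             if s == k:
--                 out.append(ex)
--     return out[:limit]
-- ===== Notes on version B (the rewrite author's own statement) =====
-- stated objective: alternative
-- what changed: Replaces the stable comparison sort over (overlap, example) pairs by a counting-sort style collection: examples are scored once, then gathered in input order for each overlap value from the maximum down to 1, and the concatenation is cut to limit.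
import Mathlib
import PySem

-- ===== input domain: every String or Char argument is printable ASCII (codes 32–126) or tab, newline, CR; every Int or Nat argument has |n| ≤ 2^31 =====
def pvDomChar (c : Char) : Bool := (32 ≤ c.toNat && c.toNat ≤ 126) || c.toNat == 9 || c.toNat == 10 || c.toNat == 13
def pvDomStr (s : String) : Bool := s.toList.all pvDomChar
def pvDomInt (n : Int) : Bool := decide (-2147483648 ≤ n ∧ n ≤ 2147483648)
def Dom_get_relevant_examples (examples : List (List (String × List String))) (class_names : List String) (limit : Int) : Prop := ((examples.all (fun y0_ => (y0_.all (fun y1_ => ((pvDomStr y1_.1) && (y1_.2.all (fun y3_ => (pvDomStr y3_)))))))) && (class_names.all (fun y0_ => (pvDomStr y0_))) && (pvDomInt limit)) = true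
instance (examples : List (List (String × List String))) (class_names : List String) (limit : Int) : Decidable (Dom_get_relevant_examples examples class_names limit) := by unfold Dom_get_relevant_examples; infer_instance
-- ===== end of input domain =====

-- B replaces A's stable reverse comparison sort by a counting-sort style collection
-- (one scoring pass, then buckets visited from the maximal overlap down to 1): an
-- alternative algorithm of similar cost, proved to return the same list.


-- ===== PORT A =====
-- literal port of A: build (overlap, ex) pairs, stable-sort by overlap reverse, slice, project
def get_relevant_examples (examples : List (List (String × List String))) (class_names : List String) (limit : Int) : List (List (String × List String)) :=
  let scored := examples.foldl (fun acc ex =>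
    let ex_classes := PySem.Set.ofList ((PySem.Dict.mk ex).getD "classes" [])
    if ex_classes = [] then acc
    else
      let overlap := PySem.Set.len (PySem.Set.inter ex_classes class_names)
      if 0 < overlap then acc ++ [(overlap, ex)] else acc) []
  let sortedScored := PySem.List.sorted scored (fun x => x.1) true
  (PySem.List.slice sortedScored none (some limit)).map (fun p => p.2)

-- ===== PORT B =====
-- literal port of B: score once, take the max score, collect buckets from top down to 1, slice
def get_relevant_examples_alt (examples : List (List (String × List String))) (class_names : List String) (limit : Int) : List (List (String × List String)) :=
  let scored := examples.map (fun ex =>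
    (PySem.Set.len (PySem.Set.inter (PySem.Set.ofList ((PySem.Dict.mk ex).getD "classes" [])) class_names), ex))
  let top := scored.foldl (fun t p => if t < p.1 then p.1 else t) 0
  let out := (PySem.List.pyRange top 0 (-1)).foldl (fun acc k =>
    scored.foldl (fun acc2 p => if p.1 = k then acc2 ++ [p.2] else acc2) acc) []
  PySem.List.slice out none (some limit)

-- ===== PRECONDITION & SPEC =====
def Spec_get_relevant_examples (examples : List (List (String × List String))) (class_names : List String) (limit : Int) (out : List (List (String × List String))) : Prop := out = get_relevant_examples_alt examples class_names limit
instance (examples : List (List (String × List String))) (class_names : List String) (limit : Int) (out : List (List (String × List String))) : Decidable (Spec_get_relevant_examples examples class_names limit out) := by unfold Spec_get_relevant_examples; infer_instance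

-- ===== CLAIM (what is proved, stated in full; the proofs are below) =====
def Claim_equal_get_relevant_examples : Prop := ∀ (examples : List (List (String × List String))) (class_names : List String) (limit : Int), Dom_get_relevant_examples examples class_names limit → Spec_get_relevant_examples examples class_names limit (get_relevant_examples examples class_names limit)

-- ===== LEMMAS AND PROOFS =====

-- [t, t-1, …, 1] as a Nat-indexed list
def descInt : Nat → List Int
  | 0 => []
  | n + 1 => ((n + 1 : Nat) : Int) :: descInt n

-- bucket collection: for each k = t, t-1, …, 1 the elements of xs with key k, in order
def gBuckets {α : Type} (t : Nat) (xs : List (Int × α)) : List (Int × α) :=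
  (descInt t).flatMap (fun k => xs.filter (fun p => decide (p.1 = k)))

theorem gBuckets_succ {α : Type} (n : Nat) (xs : List (Int × α)) :
    gBuckets (n + 1) xs = xs.filter (fun p => decide (p.1 = ((n + 1 : Nat) : Int))) ++ gBuckets n xs := by
  simp [gBuckets, descInt]

theorem gBuckets_nil {α : Type} (t : Nat) : gBuckets (α := α) t [] = [] := by
  simp [gBuckets]

theorem mem_gBuckets {α : Type} {t : Nat} {xs : List (Int × α)} {p : Int × α}
    (h : p ∈ gBuckets t xs) : p ∈ xs ∧ 1 ≤ p.1 ∧ p.1 ≤ (t : Int) := by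
  induction t with
  | zero => simp [gBuckets, descInt] at h
  | succ n ih =>
    rw [gBuckets_succ, List.mem_append] at h
    rcases h with h | h
    · rw [List.mem_filter] at h
      refine ⟨h.1, ?_, ?_⟩ <;> have := of_decide_eq_true h.2 <;> omega
    · obtain ⟨h1, h2, h3⟩ := ih h
      refine ⟨h1, h2, by push_cast; omega⟩

theorem gBuckets_append_gt {α : Type} (t : Nat) (xs : List (Int × α)) (x : Int × α)
    (h : (t : Int) < x.1) : gBuckets t (xs ++ [x]) = gBuckets t xs := by
  induction t with
  | zero => simp [gBuckets, descInt]
  | succ n ih =>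
    have hn : (n : Int) < x.1 := by push_cast at h ⊢; omega
    rw [gBuckets_succ, gBuckets_succ, List.filter_append, ih hn]
    have hd : (decide (x.1 = ((n : Int) + 1))) = false := by simp; omega
    simp [hd]

theorem insertBy_skip {α : Type} (before : α → α → Bool) (x : α) (ys zs : List α)
    (h : ∀ y ∈ ys, before x y = false) :
    PySem.List.insertBy before x (ys ++ zs) = ys ++ PySem.List.insertBy before x zs := by
  induction ys with
  | nil => simp
  | cons y ys ih =>
    have hy := h y (by simp)
    simp only [List.cons_append, PySem.List.insertBy, hy]
    simp only [Bool.false_eq_true, if_false]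
    rw [ih (fun y hy => h y (by simp [hy]))]

theorem insertBy_front {α : Type} (before : α → α → Bool) (x : α) (zs : List α)
    (h : ∀ z ∈ zs, before x z = true) :
    PySem.List.insertBy before x zs = x :: zs := by
  cases zs with
  | nil => rfl
  | cons z zs => simp [PySem.List.insertBy, h z (by simp)]

theorem insertBy_gBuckets {α : Type} (t : Nat) (xs : List (Int × α)) (x : Int × α)
    (h1 : 1 ≤ x.1) (h2 : x.1 ≤ (t : Int)) :
    PySem.List.insertBy (fun a b => decide (b.1 < a.1)) x (gBuckets t xs)
      = gBuckets t (xs ++ [x]) := by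
  induction t with
  | zero => exact absurd h2 (by simp; omega)
  | succ n ih =>
    rw [gBuckets_succ, gBuckets_succ]
    have hskip : ∀ y ∈ xs.filter (fun p => decide (p.1 = ((n + 1 : Nat) : Int))),
        (decide (y.1 < x.1)) = false := by
      intro y hy
      rw [List.mem_filter] at hy
      have := of_decide_eq_true hy.2
      simp only [decide_eq_false_iff_not, not_lt]
      omega
    rw [insertBy_skip _ _ _ _ hskip]
    by_cases hx : x.1 = ((n + 1 : Nat) : Int)
    · have hfront : ∀ z ∈ gBuckets n xs, (decide (z.1 < x.1)) = true := by
        intro z hz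
        have := (mem_gBuckets hz).2.2
        simp only [decide_eq_true_eq]
        omega
      rw [insertBy_front _ _ _ hfront]
      rw [List.filter_append, gBuckets_append_gt n xs x (by omega)]
      have hd : (decide (x.1 = ((n : Int) + 1))) = true := by simp; omega
      simp [hd]
    · have hn : x.1 ≤ (n : Int) := by push_cast at h2 ⊢; omega
      rw [ih hn, List.filter_append]
      have hd : (decide (x.1 = ((n : Int) + 1))) = false := by simp; omega
      simp [hd]

theorem foldl_insertBy_gBuckets {α : Type} (t : Nat) (xs : List (Int × α))
    (h : ∀ p ∈ xs, 1 ≤ p.1 ∧ p.1 ≤ (t : Int)) :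
    xs.foldl (fun acc x => PySem.List.insertBy (fun a b => decide (b.1 < a.1)) x acc) []
      = gBuckets t xs := by
  induction xs using List.reverseRecOn with
  | nil => exact (gBuckets_nil t).symm
  | append_singleton xs x ih =>
    rw [List.foldl_append, List.foldl_cons, List.foldl_nil]
    rw [ih (fun p hp => h p (by simp [hp]))]
    exact insertBy_gBuckets t xs x (h x (by simp)).1 (h x (by simp)).2

theorem le_foldl_maxStep {α : Type} (l : List (Int × α)) (a : Int) :
    a ≤ l.foldl (fun t p => if t < p.1 then p.1 else t) a := by
  induction l generalizing a with
  | nil => simp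
  | cons x l ih =>
    simp only [List.foldl_cons]
    refine le_trans ?_ (ih (if a < x.1 then x.1 else a))
    split <;> omega

theorem mem_le_foldl_maxStep {α : Type} (l : List (Int × α)) (a : Int) {p : Int × α}
    (hp : p ∈ l) : p.1 ≤ l.foldl (fun t q => if t < q.1 then q.1 else t) a := by
  induction l generalizing a with
  | nil => simp at hp
  | cons x l ih =>
    simp only [List.foldl_cons]
    rcases List.mem_cons.mp hp with rfl | hp
    · refine le_trans ?_ (le_foldl_maxStep l _)
      split <;> omega
    · exact ih _ hp

theorem map_range_sub (t : Nat) :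
    (List.range t).map (fun k : Nat => (t : Int) - (k : Int)) = descInt t := by
  induction t with
  | zero => simp [descInt]
  | succ n ih =>
    rw [List.range_succ_eq_map, List.map_cons, List.map_map]
    have hfun : ((fun k : Nat => ((n + 1 : Nat) : Int) - (k : Int)) ∘ Nat.succ)
        = (fun k : Nat => (n : Int) - (k : Int)) := by
      funext k
      simp only [Function.comp]
      push_cast
      ring
    rw [hfun, ih]
    simp [descInt]

theorem pyRange_desc (t : Nat) : PySem.List.pyRange (t : Int) 0 (-1) = descInt t := by
  cases t with
  | zero => simp [PySem.List.pyRange, descInt]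
  | succ n =>
    have h0 : (0 : Int) < ((n + 1 : Nat) : Int) := by exact_mod_cast Nat.succ_pos n
    simp only [PySem.List.pyRange]
    norm_num [h0]
    rw [← map_range_sub (n + 1)]
    apply List.map_congr_left
    intro k _
    push_cast
    ring

theorem gBuckets_filter_pos {α : Type} (t : Nat) (l : List (Int × α)) :
    gBuckets t (l.filter (fun p => decide (0 < p.1))) = gBuckets t l := by
  induction t with
  | zero => simp [gBuckets, descInt]
  | succ n ih =>
    rw [gBuckets_succ, gBuckets_succ, ih, List.filter_filter]
    congr 1
    apply List.filter_congr
    intro p _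
    simp
    omega

theorem slice_map {α β : Type} (f : α → β) (l : List α) (b : Int) :
    (PySem.List.slice l none (some b)).map f = PySem.List.slice (l.map f) none (some b) := by
  simp [PySem.List.slice, List.map_take]

-- ===== VERDICT (by name: the statement is the Claim_ definition above) =====
theorem get_relevant_examples_spec : Claim_equal_get_relevant_examples := by
  intro examples class_names limit _
  unfold Spec_get_relevant_examples get_relevant_examples get_relevant_examples_alt
  set score : List (String × List String) → Int := fun ex =>
    PySem.Set.len (PySem.Set.inter (PySem.Set.ofList ((PySem.Dict.mk ex).getD "classes" [])) class_names) with hscore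
  set f : List (String × List String) → Int × List (String × List String) :=
    fun ex => (score ex, ex) with hf
  -- A's accumulation loop builds exactly the positive-score pairs, in order
  have hloopA : examples.foldl (fun acc ex =>
      let ex_classes := PySem.Set.ofList ((PySem.Dict.mk ex).getD "classes" [])
      if ex_classes = [] then acc
      else
        let overlap := PySem.Set.len (PySem.Set.inter ex_classes class_names)
        if 0 < overlap then acc ++ [(overlap, ex)] else acc) []
      = (examples.map f).filter (fun p => decide (0 < p.1)) := by
    have hbody : ∀ (acc : List (Int × List (String × List String))) (ex : List (String × List String)),
        (let ex_classes := PySem.Set.ofList ((PySem.Dict.mk ex).getD "classes" [])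
         if ex_classes = [] then acc
         else
           let overlap := PySem.Set.len (PySem.Set.inter ex_classes class_names)
           if 0 < overlap then acc ++ [(overlap, ex)] else acc)
        = if (decide (0 < (f ex).1)) = true then acc ++ [f ex] else acc := by
      intro acc ex
      by_cases hemp : PySem.Set.ofList ((PySem.Dict.mk ex).getD "classes" []) = []
      · have : score ex = 0 := by
          simp [hscore, PySem.Set.len, PySem.Set.inter, hemp]
        simp [hemp, hf, this]
      · simp only [hemp, if_false, hf, hscore, decide_eq_true_eq]
        
    calc examples.foldl _ [] = examples.foldl
          (fun acc ex => if (decide (0 < (f ex).1)) = true then acc ++ [f ex] else acc) [] := by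
          exact PySem.List.foldl_congr_mem examples _ _ [] (fun acc x _ => hbody acc x)
      _ = [] ++ (examples.filter (fun ex => decide (0 < (f ex).1))).map f :=
          PySem.List.foldl_append_if _ f examples []
      _ = (examples.map f).filter (fun p => decide (0 < p.1)) := by
          rw [List.nil_append, List.filter_map]
          rfl
  rw [hloopA]
  set scored := examples.map f with hscored
  set pos := scored.filter (fun p => decide (0 < p.1)) with hpos
  set top := scored.foldl (fun t p => if t < p.1 then p.1 else t) 0 with htop
  have htop0 : 0 ≤ top := le_foldl_maxStep scored 0
  set t : Nat := top.toNat with ht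
  have htcast : (t : Int) = top := Int.toNat_of_nonneg htop0
  -- A's sort is the bucket collection
  have hsort : PySem.List.sorted pos (fun x => x.1) true = gBuckets t scored := by
    simp only [PySem.List.sorted_rev_eq_foldl_insertBy]
    rw [foldl_insertBy_gBuckets t pos (by
      intro p hp
      rw [hpos, List.mem_filter] at hp
      have h1 := of_decide_eq_true hp.2
      have h2 := mem_le_foldl_maxStep scored 0 hp.1
      constructor <;> omega)]
    rw [hpos, gBuckets_filter_pos]
  -- B's double loop is the projected bucket collection
  have hloopB : (PySem.List.pyRange top 0 (-1)).foldl (fun acc k =>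
      scored.foldl (fun acc2 p => if p.1 = k then acc2 ++ [p.2] else acc2) acc) []
      = (gBuckets t scored).map (fun p => p.2) := by
    rw [← htcast, pyRange_desc]
    have hinner : ∀ (acc : List (List (String × List String))) (k : Int),
        scored.foldl (fun acc2 p => if p.1 = k then acc2 ++ [p.2] else acc2) acc
          = acc ++ (scored.filter (fun p => decide (p.1 = k))).map (fun p => p.2) := by
      intro acc k
      have := PySem.List.foldl_append_if (fun p : Int × List (String × List String) => decide (p.1 = k))
        (fun p => p.2) scored acc
      simp only [decide_eq_true_eq] at this ⊢
      exact this
    calc (descInt t).foldl _ []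
        = (descInt t).foldl (fun acc k => acc ++ (scored.filter (fun p => decide (p.1 = k))).map (fun p => p.2)) [] := by
          exact PySem.List.foldl_congr_mem _ _ _ [] (fun acc k _ => hinner acc k)
      _ = [] ++ (descInt t).flatMap (fun k => (scored.filter (fun p => decide (p.1 = k))).map (fun p => p.2)) :=
          PySem.List.foldl_append_eq_flatMap _ _ []
      _ = (gBuckets t scored).map (fun p => p.2) := by
          rw [List.nil_append, gBuckets, List.map_flatMap]
  show (PySem.List.slice (PySem.List.sorted pos (fun x => x.1) true) none (some limit)).map (fun p => p.2)
      = PySem.List.slice ((PySem.List.pyRange top 0 (-1)).foldl (fun acc k =>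
          scored.foldl (fun acc2 p => if p.1 = k then acc2 ++ [p.2] else acc2) acc) []) none (some limit)
  rw [hloopB, hsort, slice_map]
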